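-- pv_equiv track=rewrite | github.com/SlamaFR/AP2 | TP/TP3/Ex 2.py | vol_et_altitude
-- ===== SOURCE A (Python) =====
-- def vol_et_altitude(a, compteur=0, max_alt=None):
--     """
--     Calcule le temps de vol et l'altitude maximale à partir de a.
--     :param a: Terme initial.
--     :param compteur: Nombre d'étapes effectuées.
--     :param max_alt: Altitude maximale constatée.
--     :return: Temps de vol et altitude maximale.
--
--     >>> vol_et_altitude(6)
--     (8, 16)
--     """
--     if max_alt is None or a > max_alt:
--         max_alt = a
--     if a != 1:
--         if a % 2 == 0:
--             return vol_et_altitude(a // 2, compteur + 1, max_alt)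
--         else:
--             return vol_et_altitude(3 * a + 1, compteur + 1, max_alt)
--     else:
--         return compteur, max_alt
-- ===== SOURCE B (Python) =====
-- def vol_et_altitude(a, compteur=0, max_alt=None):
--     if max_alt is None or a > max_alt:
--         max_alt = a
--     while a != 1:
--         a = a // 2 if a % 2 == 0 else 3 * a + 1
--         compteur += 1
--         if a > max_alt:
--             max_alt = a
--     return compteur, max_alt
-- ===== Notes on version B (the rewrite author's own statement) =====
-- stated objective: idiomatic
-- what changed: The tail recursion is replaced by an iterative while loop: max_alt is seeded once before the loop and compteur/max_alt are updated as ordinary locals each step, instead of being threaded through recursive calls.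
import Mathlib
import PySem

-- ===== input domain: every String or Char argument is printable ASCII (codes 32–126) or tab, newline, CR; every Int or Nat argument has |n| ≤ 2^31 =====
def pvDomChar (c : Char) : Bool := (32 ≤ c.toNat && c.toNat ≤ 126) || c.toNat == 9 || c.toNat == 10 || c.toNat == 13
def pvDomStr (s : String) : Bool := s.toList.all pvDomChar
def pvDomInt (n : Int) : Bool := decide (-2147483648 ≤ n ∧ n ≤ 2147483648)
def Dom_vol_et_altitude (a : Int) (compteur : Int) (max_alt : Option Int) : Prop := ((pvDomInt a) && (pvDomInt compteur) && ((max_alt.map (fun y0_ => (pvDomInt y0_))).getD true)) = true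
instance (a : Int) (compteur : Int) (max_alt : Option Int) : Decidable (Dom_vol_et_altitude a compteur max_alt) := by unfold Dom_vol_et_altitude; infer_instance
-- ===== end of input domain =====

-- B replaces A's tail recursion by an iterative while loop (idiomatic decomposition); same values.


-- ===== PORT A =====
-- A's recursion; the Nat fuel only makes it total (Collatz termination is unprovable in general).
-- 100000 far exceeds the stopping time of any a ≤ 2^31; on fuel exhaustion it returns the current state.
def volGoA (fuel : Nat) (a : Int) (compteur : Int) (max_alt : Option Int) : Int × Int :=
  -- `if max_alt is None or a > max_alt: max_alt = a`
  let m : Int := match max_alt with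
    | none => a
    | some v => if a > v then a else v
  match fuel with
  | 0 => (compteur, m)
  | fuel + 1 =>
    if a ≠ 1 then
      if PySem.Int.mod a 2 = 0 then
        volGoA fuel (PySem.Int.floordiv a 2) (compteur + 1) (some m)
      else
        volGoA fuel (3 * a + 1) (compteur + 1) (some m)
    else
      (compteur, m)

def vol_et_altitude (a : Int) (compteur : Int) (max_alt : Option Int) : Int × Int :=
  volGoA 100000 a compteur max_alt

-- ===== PORT B =====
-- B's while loop as tail recursion on the same fuel; max_alt is a plain Int seeded before the loop.
def volGoB (fuel : Nat) (a : Int) (compteur : Int) (m : Int) : Int × Int :=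
  match fuel with
  | 0 => (compteur, m)
  | fuel + 1 =>
    if a ≠ 1 then
      let a' := if PySem.Int.mod a 2 = 0 then PySem.Int.floordiv a 2 else 3 * a + 1
      volGoB fuel a' (compteur + 1) (if a' > m then a' else m)
    else
      (compteur, m)

def vol_et_altitude_alt (a : Int) (compteur : Int) (max_alt : Option Int) : Int × Int :=
  let m0 : Int := match max_alt with
    | none => a
    | some v => if a > v then a else v
  volGoB 100000 a compteur m0

-- ===== PRECONDITION & SPEC =====
-- Pre_ excludes a ≤ 0: there the Collatz iteration never reaches 1 and Python A raises RecursionError.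
def Pre_vol_et_altitude (a : Int) (compteur : Int) (max_alt : Option Int) : Prop := 1 ≤ a
instance (a : Int) (compteur : Int) (max_alt : Option Int) : Decidable (Pre_vol_et_altitude a compteur max_alt) := by unfold Pre_vol_et_altitude; infer_instance
def pvWitness_vol_et_altitude : Int × Int × Option Int := (6, 0, none)

def Spec_vol_et_altitude (a : Int) (compteur : Int) (max_alt : Option Int) (out : Int × Int) : Prop := out = vol_et_altitude_alt a compteur max_alt
instance (a : Int) (compteur : Int) (max_alt : Option Int) (out : Int × Int) : Decidable (Spec_vol_et_altitude a compteur max_alt out) := by unfold Spec_vol_et_altitude; infer_instance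

-- ===== CLAIM (what is proved, stated in full; the proofs are below) =====
def Claim_equal_vol_et_altitude : Prop := ∀ (a : Int) (compteur : Int) (max_alt : Option Int), Dom_vol_et_altitude a compteur max_alt → Pre_vol_et_altitude a compteur max_alt → Spec_vol_et_altitude a compteur max_alt (vol_et_altitude a compteur max_alt)

-- ===== LEMMAS AND PROOFS =====
-- Loop correspondence: A's recursion with pending max-update equals B's loop with the update applied.
theorem volGo_eq (fuel : Nat) : ∀ (a compteur : Int) (max_alt : Option Int),
    volGoA fuel a compteur max_alt
      = volGoB fuel a compteur
          (match max_alt with | none => a | some v => if a > v then a else v) := by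
  induction fuel with
  | zero => intro a c m; cases m <;> simp [volGoA, volGoB]
  | succ f ih =>
    intro a c m
    cases m <;> simp only [volGoA, volGoB] <;> split_ifs <;>
      simp_all <;> (congr 1) <;> split_ifs <;> omega

-- ===== VERDICT (by name: the statement is the Claim_ definition above) =====
theorem vol_et_altitude_spec : Claim_equal_vol_et_altitude := by
  intro a c m _ _
  unfold Spec_vol_et_altitude vol_et_altitude vol_et_altitude_alt
  exact volGo_eq 100000 a c m
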